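-- pv_equiv track=rewrite | github.com/CelsoHacker/NeuroROM-AI | triage_min.py | diff_ranges
-- ===== SOURCE A (Python) =====
-- def diff_ranges(a,b):
--     n=min(len(a),len(b))
--     out=[]
--     i=0
--     while i<n:
--         if a[i]!=b[i]:
--             s=i; i+=1
--             while i<n and a[i]!=b[i]: i+=1
--             out.append((s,i))
--         else:
--             i+=1
--     if len(a)!=len(b):
--         out.append((n, max(len(a),len(b))))
--     return out
-- ===== SOURCE B (Python) =====
-- def diff_ranges(a, b):
--     # table-then-group decomposition: build a mismatch-flag table, run-length
--     # encode it, then turn the runs into ranges; tail length difference appended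
--     # separately, exactly as in the original.
--     flags = [x != y for x, y in zip(a, b)]
--     runs = []
--     for f in flags:
--         if runs and runs[-1][0] == f:
--             runs[-1] = (f, runs[-1][1] + 1)
--         else:
--             runs.append((f, 1))
--     out = []
--     i = 0
--     for f, k in runs:
--         if f:
--             out.append((i, i + k))
--         i += k
--     if len(a) != len(b):
--         out.append((min(len(a), len(b)), max(len(a), len(b))))
--     return out
-- ===== Notes on version B (the rewrite author's own statement) =====
-- stated objective: alternative
-- what changed: replaces A's index-walking nested while loops with a three-pass table decomposition: build a flag list of mismatches, run-length encode it with a single fold, then convert runs to ranges; the length-difference tail tuple is appended separately as in A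
import Mathlib
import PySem

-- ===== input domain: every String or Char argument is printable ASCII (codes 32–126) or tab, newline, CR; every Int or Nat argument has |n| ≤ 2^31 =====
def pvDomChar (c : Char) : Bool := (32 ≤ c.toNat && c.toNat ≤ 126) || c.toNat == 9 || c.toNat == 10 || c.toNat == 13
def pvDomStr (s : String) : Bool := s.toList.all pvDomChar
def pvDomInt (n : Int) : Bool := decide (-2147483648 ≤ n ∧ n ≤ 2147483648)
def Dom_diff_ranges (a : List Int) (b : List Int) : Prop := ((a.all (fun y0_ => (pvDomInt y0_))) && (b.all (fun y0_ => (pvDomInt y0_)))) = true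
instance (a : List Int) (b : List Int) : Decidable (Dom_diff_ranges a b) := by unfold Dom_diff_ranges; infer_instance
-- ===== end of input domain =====

-- B replaces A's index-walking nested while loops by a build-table-then-group
-- decomposition (flag list, run-length encoding, runs-to-ranges); same cost, no speed claim.

-- ===== PORT A =====
-- inner 'while i<n and a[i]!=b[i]: i+=1' of A; fuel only makes the loop total
-- (n steps always suffice); indices are in range under the guard, so pyGetD is exact
def pvInnerA (a b : List Int) (n : Nat) : Nat → Nat → Nat
  | 0, i => i
  | fuel + 1, i =>
    if i < n ∧ PySem.List.pyGetD a (i : Int) 0 ≠ PySem.List.pyGetD b (i : Int) 0 then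
      pvInnerA a b n fuel (i + 1)
    else i

-- outer while loop of A, state = (i, out); fuel only makes the loop total
def pvOuterA (a b : List Int) (n : Nat) : Nat → Nat → List (Int × Int) → List (Int × Int)
  | 0, _, out => out
  | fuel + 1, i, out =>
    if i < n then
      if PySem.List.pyGetD a (i : Int) 0 ≠ PySem.List.pyGetD b (i : Int) 0 then
        let j := pvInnerA a b n n (i + 1)
        pvOuterA a b n fuel j (out ++ [((i : Int), (j : Int))])
      else pvOuterA a b n fuel (i + 1) out
    else out

def diff_ranges (a : List Int) (b : List Int) : List (Int × Int) :=
  let n := min a.length b.length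
  let out := pvOuterA a b n n 0 []
  if a.length ≠ b.length then out ++ [((n : Int), ((max a.length b.length : Nat) : Int))]
  else out

-- ===== PORT B =====
def pvFlags (a b : List Int) : List Bool :=
  List.zipWith (fun x y => x != y) a b

-- run-length encoding fold of Source B; the Python mutates the LAST run, the Lean
-- accumulator keeps the runs reversed (head = last run) and reverses at the end
def pvRunStep (runs : List (Bool × Nat)) (f : Bool) : List (Bool × Nat) :=
  match runs with
  | (g, k) :: rest => if g == f then (g, k + 1) :: rest else (f, 1) :: (g, k) :: rest
  | [] => [(f, 1)]

def pvRuns (flags : List Bool) : List (Bool × Nat) :=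
  (flags.foldl pvRunStep []).reverse

-- runs-to-ranges pass of Source B, state = (i, out); out built by recursion on runs
def pvConsume (runs : List (Bool × Nat)) (i : Int) : List (Int × Int) :=
  match runs with
  | [] => []
  | (f, k) :: rest => (if f then [(i, i + (k : Int))] else []) ++ pvConsume rest (i + (k : Int))

def diff_ranges_alt (a : List Int) (b : List Int) : List (Int × Int) :=
  let out := pvConsume (pvRuns (pvFlags a b)) 0
  if a.length ≠ b.length then
    out ++ [(((min a.length b.length : Nat) : Int), ((max a.length b.length : Nat) : Int))]
  else out

-- ===== PRECONDITION & SPEC =====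
def Spec_diff_ranges (a : List Int) (b : List Int) (out : List (Int × Int)) : Prop := out = diff_ranges_alt a b
instance (a : List Int) (b : List Int) (out : List (Int × Int)) : Decidable (Spec_diff_ranges a b out) := by unfold Spec_diff_ranges; infer_instance

-- ===== CLAIM (what is proved, stated in full; the proofs are below) =====
def Claim_equal_diff_ranges : Prop := ∀ (a : List Int) (b : List Int), Dom_diff_ranges a b → Spec_diff_ranges a b (diff_ranges a b)

-- ===== LEMMAS AND PROOFS =====

-- recursive (takeWhile/dropWhile) run-length encoding, used only as a proof vehicle
def pvRleRec (flags : List Bool) : List (Bool × Nat) :=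
  match flags with
  | [] => []
  | f :: fs => (f, 1 + (fs.takeWhile (· == f)).length) :: pvRleRec (fs.dropWhile (· == f))
termination_by flags.length
decreasing_by
  have := List.length_dropWhile_le (p := (· == f)) (l := fs)
  simp; omega

theorem pvRuns_aux_run (fs : List Bool) (g : Bool) (k : Nat) (acc : List (Bool × Nat)) :
    List.foldl pvRunStep ((g, k) :: acc) fs =
    List.foldl pvRunStep ((g, k + (fs.takeWhile (· == g)).length) :: acc) (fs.dropWhile (· == g)) := by
  induction fs generalizing k with
  | nil => simp
  | cons f fs ih =>
    by_cases h : f = g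
    · subst h
      rw [List.foldl_cons,
        show pvRunStep ((f, k) :: acc) f = (f, k + 1) :: acc from by simp [pvRunStep],
        ih (k + 1),
        List.takeWhile_cons_of_pos (by simp), List.dropWhile_cons_of_pos (by simp)]
      congr 2
      simp
      omega
    · have hb : (f == g) = false := by simp [h]
      simp [List.takeWhile_cons_of_neg, List.dropWhile_cons_of_neg, hb]

theorem length_takeWhile_le' {α : Type} (p : α → Bool) (l : List α) :
    (l.takeWhile p).length ≤ l.length :=
  (List.takeWhile_sublist p).length_le

theorem head_dropWhile_ne (fs : List Bool) (g x : Bool) (xs : List Bool)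
    (h : fs.dropWhile (· == g) = x :: xs) : x ≠ g := by
  induction fs with
  | nil => simp [List.dropWhile] at h
  | cons f fs ih =>
    by_cases hfg : f = g
    · rw [List.dropWhile_cons_of_pos (by simp [hfg])] at h
      exact ih h
    · rw [List.dropWhile_cons_of_neg (by simp [hfg])] at h
      injection h with h1 _
      rw [← h1]
      exact hfg

theorem pvRuns_eq_rleRec_aux (fs : List Bool) (acc : List (Bool × Nat))
    (hacc : ∀ g k rest, acc = (g, k) :: rest → ∀ x xs, fs = x :: xs → x ≠ g) :
    (List.foldl pvRunStep acc fs).reverse = acc.reverse ++ pvRleRec fs := by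
  match hfs : fs with
  | [] => simp [pvRleRec]
  | f :: fs' =>
    have hstep : pvRunStep acc f = (f, 1) :: acc := by
      match acc with
      | [] => rfl
      | (g, k) :: rest =>
        have hne : f ≠ g := hacc g k rest rfl f fs' rfl
        simp [pvRunStep, Ne.symm hne]
    rw [List.foldl_cons, hstep,
      pvRuns_aux_run fs' f 1 acc]
    have hlen : (fs'.dropWhile (· == f)).length < (f :: fs').length := by
      have := List.length_dropWhile_le (p := (· == f)) (l := fs')
      simp; omega
    rw [pvRuns_eq_rleRec_aux (fs'.dropWhile (· == f)) _ ?_]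
    · simp [pvRleRec]
    · intro g k rest hr x xs hx
      have : g = f := by
        injection hr with h1 _
        injection h1 with h1 _
        exact h1.symm
      subst this
      exact head_dropWhile_ne fs' g x xs hx
termination_by fs.length
decreasing_by simpa [hfs] using hlen

theorem pvRuns_eq_rleRec (flags : List Bool) : pvRuns flags = pvRleRec flags := by
  unfold pvRuns
  rw [pvRuns_eq_rleRec_aux flags [] (by intro g k rest h; simp at h)]
  simp

-- flag table lookup: inside the common prefix the flag is the mismatch test
theorem pvFlags_length (a b : List Int) : (pvFlags a b).length = min a.length b.length := by
  simp [pvFlags]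

theorem pvFlag_getElem (a b : List Int) (i : Nat) (hi : i < (pvFlags a b).length) :
    (pvFlags a b)[i] = true ↔
      PySem.List.pyGetD a (i : Int) 0 ≠ PySem.List.pyGetD b (i : Int) 0 := by
  have hia : i < a.length := by simp [pvFlags] at hi; omega
  have hib : i < b.length := by simp [pvFlags] at hi; omega
  rw [PySem.List.pyGetD_eq_getElem a (i := (i : Int)) 0 (by omega) (by omega),
      PySem.List.pyGetD_eq_getElem b (i := (i : Int)) 0 (by omega) (by omega)]
  simp only [pvFlags, List.getElem_zipWith, Int.toNat_natCast]
  simp [bne_iff_ne]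

-- the inner while advances exactly over the leading true-run of the flag table
theorem pvInnerA_eq (a b : List Int) (fuel i : Nat) (hi : i ≤ (pvFlags a b).length)
    (hfuel : (pvFlags a b).length - i ≤ fuel) :
    pvInnerA a b (pvFlags a b).length fuel i =
      i + (((pvFlags a b).drop i).takeWhile (· == true)).length := by
  induction fuel generalizing i with
  | zero =>
    have : i = (pvFlags a b).length := by omega
    simp [pvInnerA, this]
  | succ fuel ih =>
    by_cases hlt : i < (pvFlags a b).length
    · have hdrop : (pvFlags a b).drop i = (pvFlags a b)[i] :: (pvFlags a b).drop (i + 1) :=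
        List.drop_eq_getElem_cons hlt
      by_cases hflag : (pvFlags a b)[i] = true
      · have hcond : PySem.List.pyGetD a (i : Int) 0 ≠ PySem.List.pyGetD b (i : Int) 0 :=
          (pvFlag_getElem a b i hlt).1 hflag
        rw [pvInnerA, if_pos ⟨hlt, hcond⟩, ih (i + 1) (by omega) (by omega)]
        rw [hdrop, hflag]
        simp
        omega
      · have hcond : ¬ (PySem.List.pyGetD a (i : Int) 0 ≠ PySem.List.pyGetD b (i : Int) 0) :=
          fun h => hflag ((pvFlag_getElem a b i hlt).2 h)
        rw [pvInnerA, if_neg (by tauto)]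
        rw [hdrop]
        have : (pvFlags a b)[i] = false := by simpa using hflag
        rw [this]
        simp
    · have : i = (pvFlags a b).length := by omega
      rw [pvInnerA, if_neg (by omega)]
      simp [this]

-- consuming a false run is the same as skipping its flags one by one
theorem consume_rle_cons_false (fs : List Bool) (i : Int) :
    pvConsume (pvRleRec (false :: fs)) i = pvConsume (pvRleRec fs) (i + 1) := by
  match fs with
  | [] => simp [pvRleRec, pvConsume]
  | true :: fs' =>
    have h1 : List.takeWhile (· == false) (true :: fs') = [] := by simp
    have h2 : List.dropWhile (· == false) (true :: fs') = true :: fs' := by simp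
    rw [pvRleRec, h1, h2, pvConsume]
    simp
  | false :: fs' =>
    have h1 : List.takeWhile (· == false) (false :: fs') =
        false :: List.takeWhile (· == false) fs' := by simp
    have h2 : List.dropWhile (· == false) (false :: fs') =
        List.dropWhile (· == false) fs' := by simp
    rw [pvRleRec, pvRleRec, h1, h2, pvConsume, pvConsume]
    simp
    ring_nf

-- dropWhile as a drop
theorem dropWhile_eq_drop {α : Type} (p : α → Bool) (l : List α) :
    l.dropWhile p = l.drop (l.takeWhile p).length := by
  induction l with
  | nil => rfl
  | cons x xs ih =>
    by_cases h : p x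
    · rw [List.dropWhile_cons_of_pos h, List.takeWhile_cons_of_pos h]
      simp only [List.length_cons, List.drop_succ_cons]
      exact ih
    · rw [List.dropWhile_cons_of_neg h, List.takeWhile_cons_of_neg h]
      rfl

-- main loop invariant: A's outer loop from index i produces B's range list of the
-- remaining flag table
theorem pvOuterA_eq (a b : List Int) (fuel i : Nat) (out : List (Int × Int))
    (hi : i ≤ (pvFlags a b).length) (hfuel : (pvFlags a b).length - i ≤ fuel) :
    pvOuterA a b (pvFlags a b).length fuel i out =
      out ++ pvConsume (pvRleRec ((pvFlags a b).drop i)) (i : Int) := by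
  induction fuel generalizing i out with
  | zero =>
    have : i = (pvFlags a b).length := by omega
    simp [pvOuterA, this, pvRleRec, pvConsume]
  | succ fuel ih =>
    set flags := pvFlags a b with hf
    by_cases hlt : i < flags.length
    · have hdrop : flags.drop i = flags[i] :: flags.drop (i + 1) := List.drop_eq_getElem_cons hlt
      by_cases hflag : flags[i] = true
      · have hcond : PySem.List.pyGetD a (i : Int) 0 ≠ PySem.List.pyGetD b (i : Int) 0 :=
          (pvFlag_getElem a b i hlt).1 hflag
        rw [pvOuterA, if_pos hlt, if_pos hcond]
        have hj : pvInnerA a b flags.length flags.length (i + 1) =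
            (i + 1) + ((flags.drop (i + 1)).takeWhile (· == true)).length :=
          pvInnerA_eq a b flags.length (i + 1) (by rw [← hf]; omega) (by rw [← hf]; omega)
        set t := ((flags.drop (i + 1)).takeWhile (· == true)).length with ht
        have htle : i + 1 + t ≤ flags.length := by
          have h1 : t ≤ (flags.drop (i + 1)).length := length_takeWhile_le' _ _
          have h2 : (flags.drop (i + 1)).length = flags.length - (i + 1) := by simp
          omega
        rw [hj]
        rw [ih (i + 1 + t) _ (by omega) (by omega)]
        have hdw : List.dropWhile (· == true) (List.drop (i + 1) flags) =
            List.drop (i + 1 + t) flags := by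
          rw [dropWhile_eq_drop, List.drop_drop, ← ht]
        conv_rhs => rw [hdrop, hflag, pvRleRec, ← ht]
        rw [pvConsume, hdw]
        have hc : ((i + 1 + t : Nat) : Int) = (i : Int) + ((1 + t : Nat) : Int) := by
          push_cast; ring
        rw [List.append_assoc, ← hc]
        simp
      · have hfalse : flags[i] = false := by simpa using hflag
        have hcond : ¬ (PySem.List.pyGetD a (i : Int) 0 ≠ PySem.List.pyGetD b (i : Int) 0) :=
          fun h => hflag ((pvFlag_getElem a b i hlt).2 h)
        rw [pvOuterA, if_pos hlt, if_neg hcond]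
        rw [ih (i + 1) out (by omega) (by omega)]
        conv_rhs => rw [hdrop, hfalse, consume_rle_cons_false]
        push_cast
        ring_nf
    · have : i = flags.length := by omega
      rw [pvOuterA, if_neg (by omega)]
      simp [this, pvRleRec, pvConsume]

-- ===== VERDICT (by name: the statement is the Claim_ definition above) =====
theorem diff_ranges_spec : Claim_equal_diff_ranges := by
  intro a b _
  unfold Spec_diff_ranges diff_ranges diff_ranges_alt
  have hn : min a.length b.length = (pvFlags a b).length := (pvFlags_length a b).symm
  rw [pvRuns_eq_rleRec]
  simp only [hn]
  rw [pvOuterA_eq a b (pvFlags a b).length 0 [] (by omega) (by omega)]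
  simp
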